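-- pv_equiv track=rewrite | github.com/mauserne/Algorithm-My-own | 부스트캠프-자가진단.py | solution
-- ===== SOURCE A (Python) =====
-- from collections import Counter
--
-- def solution(arr):
--     arr = sorted(Counter(arr).items())
--     answer = []
--     for i in arr:
--         if i[1] > 1:
--             answer.append(i[1])
--
--     if answer:
--         return answer
--     else:
--         return [-1]
-- ===== SOURCE B (Python) =====
-- def solution(arr):
--     s = sorted(arr)
--     if not s:
--         return [-1]
--     answer = []
--     prev = s[0]
--     run = 1
--     for x in s[1:]:
--         if x == prev:
--             run += 1
--         else:
--             if run > 1:
--                 answer.append(run)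
--             prev, run = x, 1
--     if run > 1:
--         answer.append(run)
--     return answer if answer else [-1]
-- ===== Notes on version B (the rewrite author's own statement) =====
-- stated objective: alternative
-- what changed: Replaces Counter-then-sort-items with sorting the input list itself and one run-length pass over adjacent equal elements, appending each run length greater than 1.
import Mathlib
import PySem

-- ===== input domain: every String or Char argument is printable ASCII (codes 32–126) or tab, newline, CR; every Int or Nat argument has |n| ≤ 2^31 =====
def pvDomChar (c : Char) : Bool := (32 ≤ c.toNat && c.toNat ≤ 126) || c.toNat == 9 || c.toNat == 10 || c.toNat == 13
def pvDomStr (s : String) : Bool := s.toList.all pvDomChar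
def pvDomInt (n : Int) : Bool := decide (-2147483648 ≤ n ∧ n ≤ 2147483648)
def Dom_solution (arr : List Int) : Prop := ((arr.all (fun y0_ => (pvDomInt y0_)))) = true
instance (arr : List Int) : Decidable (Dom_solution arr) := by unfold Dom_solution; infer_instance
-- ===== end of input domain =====

-- B sorts the input list itself and counts runs of adjacent equal elements in one pass,
-- instead of A's Counter-then-sort-of-items; same cost, different algorithm (objective: alternative).


-- ===== PORT A =====
def solution (arr : List Int) : List Int :=
  -- arr = sorted(Counter(arr).items()): Python sorts the (key, count) tuples lexicographically
  let arr2 := PySem.List.sorted2 (PySem.Dict.counter arr).items (fun i => i.1) (fun i => i.2)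
  let answer := arr2.foldl (fun acc i => if 1 < i.2 then acc ++ [i.2] else acc) []
  if answer ≠ [] then answer else [-1]

-- ===== PORT B =====
-- the for-loop of Source B: prev = current run value, run = its length so far;
-- the two trailing 'if run > 1' flushes are the [] case
def bRuns (prev run : Int) : List Int → List Int
  | [] => if 1 < run then [run] else []
  | x :: rest =>
      if x = prev then bRuns prev (run + 1) rest
      else (if 1 < run then [run] else []) ++ bRuns x 1 rest

def solution_alt (arr : List Int) : List Int :=
  match PySem.List.sorted arr (fun x => x) with
  | [] => [-1]
  | x :: rest =>
      let answer := bRuns x 1 rest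
      if answer = [] then [-1] else answer

-- ===== PRECONDITION & SPEC =====
def Spec_solution (arr : List Int) (out : List Int) : Prop := out = solution_alt arr
instance (arr : List Int) (out : List Int) : Decidable (Spec_solution arr out) := by unfold Spec_solution; infer_instance

-- ===== CLAIM (what is proved, stated in full; the proofs are below) =====
def Claim_equal_solution : Prop := ∀ (arr : List Int), Dom_solution arr → Spec_solution arr (solution arr)

-- ===== LEMMAS AND PROOFS =====

-- the lexicographic 'before' test sorted2 uses on (key, count) pairs
def pairLt (a b : Int × Int) : Bool :=
  decide (a.1 < b.1) || (!decide (b.1 < a.1) && decide (a.2 < b.2))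

-- 'a does not come strictly after b': lexicographic ≤
def pairLe (a b : Int × Int) : Prop := pairLt b a = false

lemma pairLe_iff (a b : Int × Int) : pairLe a b ↔ a.1 < b.1 ∨ (b.1 ≤ a.1 ∧ a.1 ≤ b.1 ∧ a.2 ≤ b.2) := by
  simp [pairLe, pairLt]; omega

lemma pairLe_trans {a b c : Int × Int} (h1 : pairLe a b) (h2 : pairLe b c) : pairLe a c := by
  rw [pairLe_iff] at *; omega

lemma pairLe_of_pairLt {a b : Int × Int} (h : pairLt a b = true) : pairLe a b := by
  simp [pairLt] at h; rw [pairLe_iff]; omega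

lemma pairLe_of_not_pairLt {a b : Int × Int} (h : pairLt a b = false) : pairLe b a := by
  simp [pairLt] at h; rw [pairLe_iff]; omega

lemma insertBy_pairwise_pairLe (x : Int × Int) (ys : List (Int × Int)) (h : ys.Pairwise pairLe) :
    (PySem.List.insertBy pairLt x ys).Pairwise pairLe := by
  induction ys with
  | nil => simp [PySem.List.insertBy]
  | cons y ys ih =>
    rw [List.pairwise_cons] at h
    simp only [PySem.List.insertBy]
    by_cases hb : pairLt x y = true
    · simp only [hb]
      refine List.Pairwise.cons ?_ (List.Pairwise.cons h.1 h.2)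
      intro z hz
      rcases List.mem_cons.mp hz with rfl | hz
      · exact pairLe_of_pairLt hb
      · exact pairLe_trans (pairLe_of_pairLt hb) (h.1 z hz)
    · rw [Bool.not_eq_true] at hb
      simp only [hb]
      refine List.Pairwise.cons ?_ (ih h.2)
      intro z hz
      rcases (PySem.List.insertBy_mem_iff pairLt x z ys).mp hz with rfl | hz
      · exact pairLe_of_not_pairLt hb
      · exact h.1 z hz

lemma foldl_insertBy_pairwise_pairLe (xs acc : List (Int × Int)) (h : acc.Pairwise pairLe) :
    (xs.foldl (fun acc x => PySem.List.insertBy pairLt x acc) acc).Pairwise pairLe := by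
  induction xs generalizing acc with
  | nil => exact h
  | cons x xs ih => exact ih _ (insertBy_pairwise_pairLe x acc h)

-- naming sorted2's output when the first components are strictly increasing in ys
lemma sorted2_named (xs ys : List (Int × Int)) (hperm : ys.Perm xs)
    (hys : ys.Pairwise (fun a b => a.1 < b.1)) :
    PySem.List.sorted2 xs (fun i => i.1) (fun i => i.2) = ys := by
  have hS : PySem.List.sorted2 xs (fun i => i.1) (fun i => i.2) =
      xs.foldl (fun acc x => PySem.List.insertBy pairLt x acc) [] := rfl
  have hperm' : (PySem.List.sorted2 xs (fun i => i.1) (fun i => i.2)).Perm ys :=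
    (PySem.List.sorted2_perm xs _ _ false).trans hperm.symm
  have hle : (PySem.List.sorted2 xs (fun i => i.1) (fun i => i.2)).Pairwise pairLe := by
    rw [hS]; exact foldl_insertBy_pairwise_pairLe xs [] (by simp)
  have hysnd : (ys.map Prod.fst).Nodup := by
    rw [List.nodup_iff_pairwise_ne, List.pairwise_map]
    exact hys.imp (fun h => ne_of_lt h)
  have hnd : ((PySem.List.sorted2 xs (fun i => i.1) (fun i => i.2)).map Prod.fst).Nodup :=
    (hperm'.map Prod.fst).nodup_iff.mpr hysnd
  have hne : (PySem.List.sorted2 xs (fun i => i.1) (fun i => i.2)).Pairwise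
      (fun a b : Int × Int => a.1 ≠ b.1) := by
    rw [List.nodup_iff_pairwise_ne, List.pairwise_map] at hnd
    exact hnd
  have hlt : (PySem.List.sorted2 xs (fun i => i.1) (fun i => i.2)).Pairwise
      (fun a b : Int × Int => a.1 < b.1) := by
    refine (hle.and hne).imp ?_
    rintro a b ⟨h1, h2⟩
    rw [pairLe_iff] at h1; omega
  exact List.Perm.eq_of_pairwise
    (fun a b _ _ h1 h2 => absurd (lt_trans h1 h2) (lt_irrefl _)) hlt hys hperm'

-- the run counter absorbs a block of copies of its current value
lemma bRuns_replicate (k c : Int) (m : Nat) (t : List Int) :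
    bRuns k c (List.replicate m k ++ t) = bRuns k (c + m) t := by
  induction m generalizing c with
  | zero => simp
  | succ m ih =>
    have h1 : ((m + 1 : Nat) : Int) = (m : Int) + 1 := by push_cast; ring
    have h2 : c + ((m : Int) + 1) = c + 1 + (m : Int) := by ring
    rw [h1, h2, List.replicate_succ, List.cons_append]
    simp only [bRuns]
    exact ih (c + 1)

-- the run-length pass over a flatMap of strictly increasing runs
lemma bRuns_flat (ks : List Int) (f : Int → Nat) : ∀ (k c : Int),
    (∀ k' ∈ ks, 0 < f k') → ks.Pairwise (· < ·) → (∀ k' ∈ ks, k < k') →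
    bRuns k c (ks.flatMap (fun k' => List.replicate (f k') k')) =
      (if 1 < c then [c] else []) ++
        ks.filterMap (fun k' => if 1 < (f k' : Int) then some ((f k' : Int)) else none) := by
  induction ks with
  | nil => intro k c _ _ _; simp [bRuns]
  | cons k' ks ih =>
    intro k c hf hpw hk
    have hfk' : 0 < f k' := hf k' (by simp)
    have hne : k' ≠ k := by
      have := hk k' (by simp); omega
    rw [List.flatMap_cons]
    obtain ⟨m, hm⟩ : ∃ m, f k' = m + 1 := ⟨f k' - 1, by omega⟩
    rw [hm, List.replicate_succ, List.cons_append]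
    simp only [bRuns, if_neg hne]
    rw [List.pairwise_cons] at hpw
    rw [bRuns_replicate, ih k' (1 + m) (fun x hx => hf x (by simp [hx])) hpw.2 hpw.1]
    have h1m : (1 : Int) + m = ((f k' : Nat) : Int) := by rw [hm]; push_cast; ring
    rw [h1m, List.filterMap_cons]
    by_cases h : 1 < ((f k' : Nat) : Int)
    · simp only [if_pos h]
      simp
    · simp only [if_neg h]
      simp

-- A's append loop is a filter of the counts
lemma foldl_ans (l : List (Int × Int)) (acc : List Int) :
    l.foldl (fun acc i => if 1 < i.2 then acc ++ [i.2] else acc) acc =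
      acc ++ (l.filterMap (fun i => if 1 < i.2 then some i.2 else none)) := by
  induction l generalizing acc with
  | nil => simp
  | cons i l ih =>
    simp only [List.foldl_cons, List.filterMap_cons]
    by_cases h : 1 < i.2
    · rw [if_pos h, if_pos h, ih]; simp
    · rw [if_neg h, if_neg h, ih]

-- counting each value in the concatenation of runs
lemma count_flat (arr : List Int) (v : Int) : ∀ (ks : List Int), ks.Nodup →
    (ks.flatMap (fun k => List.replicate (List.count k arr) k)).count v =
      if v ∈ ks then List.count v arr else 0 := by
  intro ks
  induction ks with
  | nil => simp
  | cons k ks ih =>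
    intro hnd
    rw [List.nodup_cons] at hnd
    rw [List.flatMap_cons, List.count_append, List.count_replicate, ih hnd.2]
    by_cases hkv : k = v
    · subst hkv
      simp [hnd.1]
    · simp [hkv, Ne.symm hkv]

-- the concatenation of runs of strictly increasing keys is weakly increasing
lemma flat_pairwise (arr : List Int) : ∀ (ks : List Int), ks.Pairwise (· < ·) →
    (ks.flatMap (fun k => List.replicate (List.count k arr) k)).Pairwise (· ≤ ·) := by
  intro ks
  induction ks with
  | nil => simp
  | cons k ks ih =>
    intro hpw
    rw [List.pairwise_cons] at hpw
    rw [List.flatMap_cons, List.pairwise_append]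
    refine ⟨List.pairwise_replicate.mpr (Or.inr le_rfl), ih hpw.2, ?_⟩
    intro a ha b hb
    obtain rfl := List.eq_of_mem_replicate ha
    obtain ⟨k', hk', hb'⟩ := List.mem_flatMap.mp hb
    obtain rfl := List.eq_of_mem_replicate hb'
    exact le_of_lt (hpw.1 _ hk')

-- the sorted input is the concatenation of the runs of the sorted distinct keys
lemma sorted_eq_flat (arr : List Int) :
    PySem.List.sorted arr (fun x => x) =
      (PySem.List.sorted (PySem.Set.ofList arr) (fun x => x)).flatMap
        (fun k => List.replicate (List.count k arr) k) := by
  have hkperm : (PySem.List.sorted (PySem.Set.ofList arr) (fun x => x)).Perm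
      (PySem.Set.ofList arr) := PySem.List.sorted_perm _ _ _
  have hkpw : (PySem.List.sorted (PySem.Set.ofList arr) (fun x => x)).Pairwise (· < ·) :=
    PySem.List.sorted_ofList_pairwise_lt arr
  have hnd : (PySem.List.sorted (PySem.Set.ofList arr) (fun x => x)).Nodup :=
    List.nodup_iff_pairwise_ne.mpr (hkpw.imp ne_of_lt)
  apply PySem.List.sorted_id_eq_of_perm_of_pairwise
  · rw [List.perm_iff_count]
    intro v
    rw [count_flat arr v _ hnd]
    by_cases hv : v ∈ arr
    · have hv' : v ∈ PySem.List.sorted (PySem.Set.ofList arr) (fun x => x) :=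
        hkperm.mem_iff.mpr ((PySem.Set.mem_ofList _ _).mpr hv)
      simp [hv']
    · have hv' : v ∉ PySem.List.sorted (PySem.Set.ofList arr) (fun x => x) := fun h =>
        hv ((PySem.Set.mem_ofList _ _).mp (hkperm.mem_iff.mp h))
      simp [hv', List.count_eq_zero_of_not_mem hv]
  · exact flat_pairwise arr _ hkpw

-- ===== VERDICT (by name: the statement is the Claim_ definition above) =====
theorem solution_spec : Claim_equal_solution := by
  intro arr _
  show solution arr = solution_alt arr
  by_cases hnil : arr = []
  · subst hnil; decide
  · set ks := PySem.List.sorted (PySem.Set.ofList arr) (fun x => x) with hks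
    have hkperm : ks.Perm (PySem.Set.ofList arr) := PySem.List.sorted_perm _ _ _
    have hkpw : ks.Pairwise (· < ·) := PySem.List.sorted_ofList_pairwise_lt arr
    have hmem : ∀ k ∈ ks, k ∈ arr := fun k hk =>
      (PySem.Set.mem_ofList _ _).mp (hkperm.mem_iff.mp hk)
    set core : List Int :=
      ks.filterMap (fun k => if 1 < (List.count k arr : Int)
        then some ((List.count k arr : Int)) else none) with hcore
    -- A's side
    have hA : solution arr = if core ≠ [] then core else [-1] := by
      show (if (PySem.List.sorted2 (PySem.Dict.counter arr).items (fun i => i.1)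
          (fun i => i.2)).foldl (fun acc i => if 1 < i.2 then acc ++ [i.2] else acc) [] ≠ []
        then _ else [-1]) = _
      rw [PySem.Dict.items_counter arr]
      rw [sorted2_named _ (ks.map fun k => (k, (List.count k arr : Int)))
        (hkperm.map _) (by rw [List.pairwise_map]; exact hkpw)]
      rw [foldl_ans, List.nil_append, List.filterMap_map]
      rfl
    -- B's side
    have hne : ks ≠ [] := by
      intro h
      have : arr.head hnil ∈ ks := hkperm.mem_iff.mpr
        ((PySem.Set.mem_ofList _ _).mpr (List.head_mem hnil))
      rw [h] at this; exact absurd this (List.not_mem_nil)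
    obtain ⟨k0, ks', hks0⟩ := List.exists_cons_of_ne_nil hne
    have hpw' : ks'.Pairwise (· < ·) ∧ ∀ k' ∈ ks', k0 < k' := by
      have := hks0 ▸ hkpw
      rw [List.pairwise_cons] at this
      exact ⟨this.2, this.1⟩
    have hposall : ∀ k ∈ ks, 0 < List.count k arr := fun k hk =>
      List.count_pos_iff.mpr (hmem k hk)
    have hpos0 : 0 < List.count k0 arr := hposall k0 (by rw [hks0]; simp)
    obtain ⟨m, hm⟩ : ∃ m, List.count k0 arr = m + 1 := ⟨List.count k0 arr - 1, by omega⟩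
    have hflat : PySem.List.sorted arr (fun x => x) =
        k0 :: (List.replicate m k0 ++ ks'.flatMap (fun k => List.replicate (List.count k arr) k)) := by
      rw [sorted_eq_flat arr, ← hks, hks0, List.flatMap_cons, hm, List.replicate_succ,
        List.cons_append]
    have hB : solution_alt arr = if core = [] then [-1] else core := by
      show (match PySem.List.sorted arr (fun x => x) with
        | [] => [-1]
        | x :: rest => let answer := bRuns x 1 rest; if answer = [] then [-1] else answer) = _
      rw [hflat]
      show (let answer := bRuns k0 1 _; if answer = [] then [-1] else answer) = _
      rw [bRuns_replicate k0 1 m]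
      have h1m : (1 : Int) + (m : Nat) = ((List.count k0 arr : Nat) : Int) := by
        rw [hm]; push_cast; ring
      rw [h1m]
      rw [bRuns_flat ks' (fun k => List.count k arr) k0 (List.count k0 arr)
        (fun k' hk' => hposall k' (by rw [hks0]; exact List.mem_cons_of_mem _ hk'))
        hpw'.1 hpw'.2]
      rw [hcore, hks0, List.filterMap_cons]
      by_cases h : (1 : Int) < (List.count k0 arr : Nat) <;> simp [h]
    rw [hA, hB]
    by_cases h : core = [] <;> simp [h]
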